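-- pv_equiv track=rewrite | github.com/toastyengi/LaunchForge | launchpad_ctrl/core/audio.py | _parse_stream_blocks
-- ===== SOURCE A (Python) =====
-- from typing import Optional, Dict, List, Callable, Union
--
-- def _parse_stream_blocks(pactl_output: str, id_prefix: str) -> List[Dict]:
--     """Parse ``pactl list sink-inputs / source-outputs`` into a list of dicts.
--
--     Each dict has keys: id, pid, app, binary.
--     """
--     streams: List[Dict] = []
--     current: Optional[Dict] = None
--
--     for line in pactl_output.splitlines():
--         stripped = line.strip()
--
--         if stripped.startswith(id_prefix):
--             if current is not None:
--                 streams.append(current)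
--             current = {
--                 "id": stripped[len(id_prefix):],
--                 "pid": "?",
--                 "app": "?",
--                 "binary": "?",
--             }
--             continue
--
--         if current is None:
--             continue
--
--         # Properties we care about
--         if "application.process.id" in stripped:
--             val = _prop_value(stripped)
--             if val:
--                 current["pid"] = val
--         elif "application.name" in stripped and "icon" not in stripped:
--             val = _prop_value(stripped)
--             if val:
--                 current["app"] = val
--         elif "application.process.binary" in stripped:
--             val = _prop_value(stripped)
--             if val:
--                 current["binary"] = val
--
--     if current is not None:
--         streams.append(current)
--     return streams
--
-- def _prop_value(line: str) -> Optional[str]: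
--     """Extract the value from a ``key = "value"`` pactl property line."""
--     parts = line.split("=", 1)
--     if len(parts) == 2:
--         return parts[1].strip().strip('"').strip("'")
--     return None
-- ===== SOURCE B (Python) =====
-- def _prop_value(line):
--     """Extract the value from a ``key = "value"`` pactl property line."""
--     parts = line.split("=", 1)
--     if len(parts) == 2:
--         return parts[1].strip().strip('"').strip("'")
--     return None
--
--
-- def _split_at_header(lines, id_prefix):
--     """Split at the first header line: (lines before it, lines from it on)."""
--     for i, s in enumerate(lines):
--         if s.startswith(id_prefix):
--             return lines[:i], lines[i:]
--     return lines, []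
--
--
-- def _block_fields(body):
--     """Scan one block's body lines for the three properties of interest."""
--     pid = app = binary = "?"
--     for s in body:
--         if "application.process.id" in s:
--             v = _prop_value(s)
--             if v:
--                 pid = v
--         elif "application.name" in s and "icon" not in s:
--             v = _prop_value(s)
--             if v:
--                 app = v
--         elif "application.process.binary" in s:
--             v = _prop_value(s)
--             if v:
--                 binary = v
--     return pid, app, binary
--
--
-- def _parse_stream_blocks(pactl_output, id_prefix):
--     """Segment the stripped lines into header-led blocks, then map each block to its dict."""
--     stripped = [line.strip() for line in pactl_output.splitlines()]
--     _, rest = _split_at_header(stripped, id_prefix)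
--     streams = []
--     while rest:
--         head, tail = rest[0], rest[1:]
--         body, rest = _split_at_header(tail, id_prefix)
--         pid, app, binary = _block_fields(body)
--         streams.append({
--             "id": head[len(id_prefix):],
--             "pid": pid,
--             "app": app,
--             "binary": binary,
--         })
--     return streams
-- ===== Notes on version B (the rewrite author's own statement) =====
-- stated objective: alternative
-- what changed: A's single interleaved pass with an Optional current-dict accumulator is replaced by two phases: segment the stripped lines into header-led blocks (dropping the preamble), then map a pure field-extraction helper over each block, building each dict once at the end.
import Mathlib
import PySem

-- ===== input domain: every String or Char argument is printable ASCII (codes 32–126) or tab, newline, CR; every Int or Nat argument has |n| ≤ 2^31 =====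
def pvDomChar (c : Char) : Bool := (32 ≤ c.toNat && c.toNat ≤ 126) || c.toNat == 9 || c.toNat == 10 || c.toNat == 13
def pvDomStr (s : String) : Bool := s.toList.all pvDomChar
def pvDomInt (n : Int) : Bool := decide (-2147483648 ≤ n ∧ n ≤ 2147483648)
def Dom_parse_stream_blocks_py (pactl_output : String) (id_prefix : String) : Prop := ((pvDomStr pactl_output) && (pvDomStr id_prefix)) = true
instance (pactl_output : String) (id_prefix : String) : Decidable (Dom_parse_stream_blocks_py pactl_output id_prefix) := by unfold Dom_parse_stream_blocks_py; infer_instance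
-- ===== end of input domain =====

-- B restructures A's single interleaved loop (optional-dict accumulator) into two passes —
-- segment the stripped lines into header-led blocks, then map a pure field-extraction over each
-- block — objective: alternative decomposition (same cost, no speed claim).

-- ===== PORT A =====
-- _prop_value (helper both Pythons define identically)
def pvPropValue (line : String) : Option String :=
  let parts := (PySem.Str.splitMax? line "=" 1).getD []
  if parts.length = 2 then
    some (PySem.Str.stripChars (PySem.Str.stripChars (PySem.Str.strip (parts.getD 1 "")) "\"") "'")
  else none

-- 'if current is not None: streams.append(current)'
def pvFlushA (streams : List (PySem.Dict String String)) :
    Option (PySem.Dict String String) → List (PySem.Dict String String)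
  | none => streams
  | some d => streams ++ [d]

-- the dict literal A builds at a header line
def pvInitDictA (id_prefix stripped : String) : PySem.Dict String String :=
  PySem.Dict.ofList
    [("id", PySem.Str.slice stripped (some (PySem.Str.len id_prefix)) none),
     ("pid", "?"), ("app", "?"), ("binary", "?")]

-- A's if/elif property-update on the current dict ('if val:' = val is not None and non-empty)
def pvUpdateA (stripped : String) (d : PySem.Dict String String) : PySem.Dict String String :=
  if PySem.Str.isIn "application.process.id" stripped then
    match pvPropValue stripped with
    | some v => if v = "" then d else d.insert "pid" v
    | none => d
  else if PySem.Str.isIn "application.name" stripped && !PySem.Str.isIn "icon" stripped then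
    match pvPropValue stripped with
    | some v => if v = "" then d else d.insert "app" v
    | none => d
  else if PySem.Str.isIn "application.process.binary" stripped then
    match pvPropValue stripped with
    | some v => if v = "" then d else d.insert "binary" v
    | none => d
  else d

-- A's for loop over the lines, carrying (streams, current)
def pvLoopA (id_prefix : String) :
    List String → List (PySem.Dict String String) → Option (PySem.Dict String String) →
    List (PySem.Dict String String)
  | [], streams, cur => pvFlushA streams cur
  | line :: rest, streams, cur =>
    let stripped := PySem.Str.strip line
    if PySem.Str.startswith stripped id_prefix then
      pvLoopA id_prefix rest (pvFlushA streams cur) (some (pvInitDictA id_prefix stripped))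
    else
      match cur with
      | none => pvLoopA id_prefix rest streams none
      | some d => pvLoopA id_prefix rest streams (some (pvUpdateA stripped d))

def parse_stream_blocks_py (pactl_output : String) (id_prefix : String) :
    List (List (String × String)) :=
  (pvLoopA id_prefix (PySem.Str.splitlines pactl_output) [] none).map PySem.Dict.items

-- ===== PORT B =====
-- _split_at_header: (lines before the first header, lines from it on)
def pvSplitAtHeader (id_prefix : String) : List String → List String × List String
  | [] => ([], [])
  | s :: rest =>
    if PySem.Str.startswith s id_prefix then ([], s :: rest)
    else
      let p := pvSplitAtHeader id_prefix rest
      (s :: p.1, p.2)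

-- one step of _block_fields' scan over (pid, app, binary)
def pvFieldStep (st : String × String × String) (s : String) : String × String × String :=
  if PySem.Str.isIn "application.process.id" s then
    match pvPropValue s with
    | some v => if v = "" then st else (v, st.2.1, st.2.2)
    | none => st
  else if PySem.Str.isIn "application.name" s && !PySem.Str.isIn "icon" s then
    match pvPropValue s with
    | some v => if v = "" then st else (st.1, v, st.2.2)
    | none => st
  else if PySem.Str.isIn "application.process.binary" s then
    match pvPropValue s with
    | some v => if v = "" then st else (st.1, st.2.1, v)
    | none => st
  else st

-- _block_fields
def pvBlockFields (body : List String) : String × String × String :=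
  body.foldl pvFieldStep ("?", "?", "?")

-- termination measure for the while loop: the remainder never grows
theorem pvSplitAtHeader_snd_len_le (id_prefix : String) (l : List String) :
    (pvSplitAtHeader id_prefix l).2.length ≤ l.length := by
  induction l with
  | nil => simp [pvSplitAtHeader]
  | cons s rest ih =>
    simp only [pvSplitAtHeader]
    split
    · simp
    · simpa using Nat.le_succ_of_le ih

-- the while loop: rest is [] or starts with a header line
def pvLoopB (id_prefix : String) : List String → List (List (String × String))
  | [] => []
  | head :: tail =>
    let p := pvSplitAtHeader id_prefix tail
    let f := pvBlockFields p.1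
    [("id", PySem.Str.slice head (some (PySem.Str.len id_prefix)) none),
     ("pid", f.1), ("app", f.2.1), ("binary", f.2.2)] :: pvLoopB id_prefix p.2
termination_by l => l.length
decreasing_by
  exact Nat.lt_succ_of_le (pvSplitAtHeader_snd_len_le id_prefix tail)

def parse_stream_blocks_py_alt (pactl_output : String) (id_prefix : String) :
    List (List (String × String)) :=
  let stripped := (PySem.Str.splitlines pactl_output).map PySem.Str.strip
  pvLoopB id_prefix (pvSplitAtHeader id_prefix stripped).2

-- ===== PRECONDITION & SPEC =====
def Spec_parse_stream_blocks_py (pactl_output : String) (id_prefix : String) (out : List (List (String × String))) : Prop := out = parse_stream_blocks_py_alt pactl_output id_prefix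
instance (pactl_output : String) (id_prefix : String) (out : List (List (String × String))) : Decidable (Spec_parse_stream_blocks_py pactl_output id_prefix out) := by unfold Spec_parse_stream_blocks_py; infer_instance

-- ===== CLAIM (what is proved, stated in full; the proofs are below) =====
def Claim_equal_parse_stream_blocks_py : Prop := ∀ (pactl_output : String) (id_prefix : String), Dom_parse_stream_blocks_py pactl_output id_prefix → Spec_parse_stream_blocks_py pactl_output id_prefix (parse_stream_blocks_py pactl_output id_prefix)

-- ===== LEMMAS AND PROOFS =====

-- the shape every current-dict of A has: fixed four keys, in literal order
def pvMkD (i : String) (f : String × String × String) : PySem.Dict String String :=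
  PySem.Dict.mk [("id", i), ("pid", f.1), ("app", f.2.1), ("binary", f.2.2)]

theorem pvInitDictA_eq (id_prefix stripped : String) :
    pvInitDictA id_prefix stripped =
      pvMkD (PySem.Str.slice stripped (some (PySem.Str.len id_prefix)) none) ("?", "?", "?") := rfl

-- A's dict update is B's triple update, transported through pvMkD
theorem pvUpdateA_mkD (s i : String) (f : String × String × String) :
    pvUpdateA s (pvMkD i f) = pvMkD i (pvFieldStep f s) := by
  obtain ⟨a, b, c⟩ := f
  simp only [pvUpdateA, pvFieldStep, pvMkD]
  split_ifs <;> rcases pvPropValue s with _ | v <;> simp <;> split_ifs <;> rfl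

-- A's loop with a live current dict = finish this block with B's field scan, then B's loop
theorem pvLoopA_some (id_prefix : String) (lines : List String) :
    ∀ (streams : List (PySem.Dict String String)) (i : String) (f : String × String × String),
    pvLoopA id_prefix lines streams (some (pvMkD i f)) =
      streams ++ pvMkD i ((pvSplitAtHeader id_prefix (lines.map PySem.Str.strip)).1.foldl pvFieldStep f)
        :: (pvLoopB id_prefix (pvSplitAtHeader id_prefix (lines.map PySem.Str.strip)).2).map PySem.Dict.mk := by
  induction lines with
  | nil => intro streams i f; simp [pvLoopA, pvFlushA, pvSplitAtHeader, pvLoopB]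
  | cons line rest ih =>
    intro streams i f
    simp only [pvLoopA, List.map_cons, pvSplitAtHeader]
    by_cases h : PySem.Str.startswith (PySem.Str.strip line) id_prefix = true
    · rw [if_pos h, if_pos h, pvInitDictA_eq, ih, pvLoopB]
      simp [pvFlushA, pvMkD, pvBlockFields]
    · rw [if_neg h, if_neg h, pvUpdateA_mkD, ih]
      simp

-- A's loop before the first header = B after dropping the preamble
theorem pvLoopA_none (id_prefix : String) (lines : List String) :
    ∀ (streams : List (PySem.Dict String String)),
    pvLoopA id_prefix lines streams none =
      streams ++ (pvLoopB id_prefix (pvSplitAtHeader id_prefix (lines.map PySem.Str.strip)).2).map PySem.Dict.mk := by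
  induction lines with
  | nil => intro streams; simp [pvLoopA, pvFlushA, pvSplitAtHeader, pvLoopB]
  | cons line rest ih =>
    intro streams
    simp only [pvLoopA, List.map_cons, pvSplitAtHeader]
    by_cases h : PySem.Str.startswith (PySem.Str.strip line) id_prefix = true
    · rw [if_pos h, if_pos h, pvInitDictA_eq, pvLoopA_some, pvLoopB]
      simp [pvFlushA, pvMkD, pvBlockFields]
    · rw [if_neg h, if_neg h, ih]

-- ===== VERDICT (by name: the statement is the Claim_ definition above) =====
theorem parse_stream_blocks_py_spec : Claim_equal_parse_stream_blocks_py := by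
  intro pactl_output id_prefix _
  unfold Spec_parse_stream_blocks_py parse_stream_blocks_py parse_stream_blocks_py_alt
  rw [pvLoopA_none]
  have h : PySem.Dict.items ∘ PySem.Dict.mk = (id : List (String × String) → _) := rfl
  simp [h]
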